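-- pv_equiv track=rewrite | github.com/DaniPVargas/AdventOfCode2023 | Day14/problem.py | slide_rocks
-- ===== SOURCE A (Python) =====
-- def slide_rocks(columns):
--     new_columns = []
--     for col in columns:
--         new_col = []
--         rock_count = 0
--         point_count = 0
--         for i in range(len(col)):
--             if col[i] == '.':
--                 point_count += 1
--             if col[i] == 'O':
--                 rock_count += 1
--             if col[i] == '#':
--                 new_col += ['O'] * rock_count + ['.'] * point_count
--                 new_col += ['#']
--                 rock_count = 0
--                 point_count = 0
--         if rock_count > 0:
--             new_col += ['O'] * rock_count + ['.'] * point_count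
--         else:
--             new_col += ['.'] * point_count
--         new_columns.append(new_col)
--
--     return new_columns
-- ===== SOURCE B (Python) =====
-- def slide_rocks(columns):
--     result = []
--     for col in columns:
--         out = []
--         buf = []
--         for c in col:
--             if c == '#':
--                 out += sorted(buf, reverse=True)
--                 out.append('#')
--                 buf = []
--             elif c in ('O', '.'):
--                 buf.append(c)
--         out += sorted(buf, reverse=True)
--         result.append(out)
--     return result
-- ===== Notes on version B (the rewrite author's own statement) =====
-- stated objective: alternative
-- what changed: Replaces A's two-counter counting pass (rock_count/point_count rebuilt via list repetition) with a per-segment buffer of 'O'/'.' entries emitted as sorted(buffer, reverse=True) at each '#' and at the end.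
import Mathlib
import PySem

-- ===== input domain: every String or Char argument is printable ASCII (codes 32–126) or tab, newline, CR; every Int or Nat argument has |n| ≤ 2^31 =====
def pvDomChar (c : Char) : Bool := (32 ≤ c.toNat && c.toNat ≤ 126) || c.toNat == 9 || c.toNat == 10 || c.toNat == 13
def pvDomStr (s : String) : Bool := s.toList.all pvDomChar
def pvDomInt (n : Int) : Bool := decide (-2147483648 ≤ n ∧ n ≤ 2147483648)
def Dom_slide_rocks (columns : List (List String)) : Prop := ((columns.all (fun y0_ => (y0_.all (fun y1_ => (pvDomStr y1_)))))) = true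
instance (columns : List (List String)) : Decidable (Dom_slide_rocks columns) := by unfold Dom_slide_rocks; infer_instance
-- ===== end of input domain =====

-- B replaces A's per-segment O/. counters with a buffered segment emitted via a reverse sort; alternative decomposition, same results.

-- ===== PORT A =====
-- one loop step of A's inner 'for i in range(len(col))' (state: new_col, rock_count, point_count)
def pvStepA (st : List String × Nat × Nat) (c : String) : List String × Nat × Nat :=
  let point := if c = "." then st.2.2 + 1 else st.2.2
  let rock := if c = "O" then st.2.1 + 1 else st.2.1
  if c = "#" then (st.1 ++ (List.replicate rock "O" ++ List.replicate point ".") ++ ["#"], 0, 0)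
  else (st.1, rock, point)

def slide_rocks (columns : List (List String)) : List (List String) :=
  columns.map (fun col =>
    let s := col.foldl pvStepA ([], 0, 0)
    if s.2.1 > 0 then s.1 ++ (List.replicate s.2.1 "O" ++ List.replicate s.2.2 ".")
    else s.1 ++ List.replicate s.2.2 ".")

-- ===== PORT B =====
-- one loop step of B's inner loop (state: out, buf)
def pvStepB (st : List String × List String) (c : String) : List String × List String :=
  if c = "#" then (st.1 ++ PySem.List.sorted st.2 (fun x => x) true ++ ["#"], [])
  else if c = "O" ∨ c = "." then (st.1, st.2 ++ [c])
  else st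

def slide_rocks_alt (columns : List (List String)) : List (List String) :=
  columns.map (fun col =>
    let s := col.foldl pvStepB ([], [])
    s.1 ++ PySem.List.sorted s.2 (fun x => x) true)

-- ===== PRECONDITION & SPEC =====
def Spec_slide_rocks (columns : List (List String)) (out : List (List String)) : Prop := out = slide_rocks_alt columns
instance (columns : List (List String)) (out : List (List String)) : Decidable (Spec_slide_rocks columns out) := by unfold Spec_slide_rocks; infer_instance

-- ===== CLAIM (what is proved, stated in full; the proofs are below) =====
def Claim_equal_slide_rocks : Prop := ∀ (columns : List (List String)), Dom_slide_rocks columns → Spec_slide_rocks columns (slide_rocks columns)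

-- ===== LEMMAS AND PROOFS =====

-- a descending list over {"O","."} is exactly the 'O's followed by the '.'s
lemma desc_two_val (ws : List String) (h : ∀ x ∈ ws, x = "O" ∨ x = ".")
    (hp : ws.Pairwise (fun a b => b ≤ a)) :
    ws = List.replicate (ws.count "O") "O" ++ List.replicate (ws.count ".") "." := by
  induction ws with
  | nil => simp
  | cons c cs ih =>
    rcases h c (by simp) with hc | hc
    · subst hc
      have hO : ("O" :: cs).count "O" = cs.count "O" + 1 := by
        simp
      have hD : ("O" :: cs).count "." = cs.count "." := by
        simp
      rw [hO, hD, List.replicate_succ, List.cons_append]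
      exact congrArg _ (ih (fun x hx => h x (by simp [hx])) hp.of_cons)
    · subst hc
      have hall : ∀ x ∈ cs, x = "." := by
        intro x hx
        rcases h x (by simp [hx]) with h1 | h1
        · exfalso
          have hle := (List.pairwise_cons.1 hp).1 x hx
          rw [h1] at hle
          revert hle
          rw [String.le_iff_toList_le]
          decide
        · exact h1
      have hO : ("." :: cs).count "O" = 0 := by
        rw [List.count_eq_zero]
        intro hmem
        rcases List.mem_cons.1 hmem with h1 | h1
        · exact absurd h1 (by decide)
        · exact absurd (hall _ h1) (by decide)
      have hD : ("." :: cs).count "." = cs.length + 1 := by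
        simp [List.count_eq_length.2 (fun x hx => (hall x hx).symm)]
      rw [hO, hD, List.replicate_zero, List.nil_append, List.replicate_succ]
      exact congrArg _ (List.eq_replicate_length.2 hall)

-- sorted(buf, reverse=True) for a buffer over {"O","."}
lemma sorted_buf (buf : List String) (h : ∀ x ∈ buf, x = "O" ∨ x = ".") :
    PySem.List.sorted buf (fun x => x) true
      = List.replicate (buf.count "O") "O" ++ List.replicate (buf.count ".") "." := by
  have hperm := PySem.List.sorted_perm buf (fun x => x) true
  have hmem : ∀ x ∈ PySem.List.sorted buf (fun x => x) true, x = "O" ∨ x = "." := by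
    intro x hx
    exact h x ((PySem.List.mem_sorted _ _ _ _).1 hx)
  have hpw := PySem.List.sorted_pairwise_rev buf (fun x => x)
  have := desc_two_val _ hmem hpw
  rwa [hperm.count_eq, hperm.count_eq] at this

-- the per-column loops agree, given the buffer invariant
lemma col_loop (col acc buf : List String) (h : ∀ x ∈ buf, x = "O" ∨ x = ".") :
    (let s := col.foldl pvStepA (acc, buf.count "O", buf.count ".")
     if s.2.1 > 0 then s.1 ++ (List.replicate s.2.1 "O" ++ List.replicate s.2.2 ".")
     else s.1 ++ List.replicate s.2.2 ".")
    = (let s := col.foldl pvStepB (acc, buf)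
       s.1 ++ PySem.List.sorted s.2 (fun x => x) true) := by
  induction col generalizing acc buf with
  | nil =>
    simp only [List.foldl_nil, sorted_buf buf h]
    split_ifs with hpos
    · rfl
    · have : buf.count "O" = 0 := by omega
      simp [this]
  | cons c cs ih =>
    simp only [List.foldl_cons]
    by_cases h1 : c = "#"
    · subst h1
      have hA : pvStepA (acc, buf.count "O", buf.count ".") "#"
          = (acc ++ (List.replicate (buf.count "O") "O" ++ List.replicate (buf.count ".") ".") ++ ["#"], 0, 0) := by
        simp [pvStepA]
      have hB : pvStepB (acc, buf) "#"
          = (acc ++ PySem.List.sorted buf (fun x => x) true ++ ["#"], []) := by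
        simp [pvStepB]
      rw [hA, hB, sorted_buf buf h]
      have := ih (acc ++ (List.replicate (buf.count "O") "O" ++ List.replicate (buf.count ".") ".") ++ ["#"]) []
        (by intro x hx; simp at hx)
      simpa using this
    · by_cases h2 : c = "O"
      · subst h2
        have hA : pvStepA (acc, buf.count "O", buf.count ".") "O"
            = (acc, (buf ++ ["O"]).count "O", (buf ++ ["O"]).count ".") := by
          simp [pvStepA, List.count_append]
        have hB : pvStepB (acc, buf) "O" = (acc, buf ++ ["O"]) := by
          simp [pvStepB]
        rw [hA, hB]
        exact ih acc (buf ++ ["O"]) (by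
          intro x hx
          rcases List.mem_append.1 hx with hx | hx
          · exact h x hx
          · simp at hx; left; exact hx)
      · by_cases h3 : c = "."
        · subst h3
          have hA : pvStepA (acc, buf.count "O", buf.count ".") "."
              = (acc, (buf ++ ["."]).count "O", (buf ++ ["."]).count ".") := by
            simp [pvStepA, List.count_append]
          have hB : pvStepB (acc, buf) "." = (acc, buf ++ ["."]) := by
            simp [pvStepB]
          rw [hA, hB]
          exact ih acc (buf ++ ["."]) (by
            intro x hx
            rcases List.mem_append.1 hx with hx | hx
            · exact h x hx
            · simp at hx; right; exact hx)
        · have hA : pvStepA (acc, buf.count "O", buf.count ".") c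
              = (acc, buf.count "O", buf.count ".") := by
            simp [pvStepA, h1, h2, h3]
          have hB : pvStepB (acc, buf) c = (acc, buf) := by
            simp [pvStepB, h1, h2, h3]
          rw [hA, hB]
          exact ih acc buf h

-- ===== VERDICT (by name: the statement is the Claim_ definition above) =====
theorem slide_rocks_spec : Claim_equal_slide_rocks := by
  intro columns _
  unfold Spec_slide_rocks slide_rocks slide_rocks_alt
  apply List.map_congr_left
  intro col _
  exact col_loop col [] [] (by intro x hx; simp at hx)
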